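-- pv_equiv track=rewrite | github.com/MartinCastillo/Basic_maze_solving | Real_time_map_construction/robot_class_based_simulation/maze_mapping/maze_mapping.py | chain_cutter
-- ===== SOURCE A (Python) =====
-- def chain_cutter(chain):
--     """
--     Elimina ciclos de uno en uno, por que cuando lo intenté adapter a más ciclos
--     se rompío y ya eran muy altas horas de la noche como para andar con esas cosas
--     ,si retorna False es por que ya no hay más ciclos, siempre irá a cortar el
--     ciclo más largo.Retorna la cadena recortada y el boleano que confirma.
--     Takes a hole chain of actions and cut repited parts, to optimizate the actions"""
--     #A list with lists, the [element, index1,index2]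
--     elements = {}
--     #Cuenta elementos
--     #Cuenta cada cantidad de elemento el la lista
--     for (ix,elx)in enumerate(chain):
--         if(not (elx in elements)):
--             elements[elx] = 0
--         elements[elx] += 1
--     rep = []
--     for e in elements:
--         if(elements[e]>1):
--             res = [e,[]]
--             for (ix,c) in enumerate(chain):
--                 if(c == e):
--                     res[1].append(ix)
--             rep.append(res)
--     if(len(rep)>0):
--         #Tenemos una lista de cada elemento repetido y sus indices
--         #Buscamos el ciclo más grande,
--         dif = []
--         for r in rep:
--             dif.append([ r[0],r[1][-1]-r[1][0] ])
--         #Elige el mayor número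
--         dif.sort(reverse = True ,key=lambda x : x[1])
--         max_dif_index = len(chain)+1
--         for l in rep:
--             if(l[0]==dif[0][0]):
--                 max_dif_index = l
--         #Remueve
--         del chain[max_dif_index[1][0]:max_dif_index[1][-1]]
--         return True,chain
--     return False,chain
-- ===== SOURCE B (Python) =====
-- def chain_cutter(chain):
--     """One pass recording first/last index per element, then a linear argmax
--     (strict '>' keeps the first-occurrence tie-break); O(n) instead of O(n^2)."""
--     first = {}
--     last = {}
--     for i, x in enumerate(chain):
--         if x not in first:
--             first[x] = i
--         last[x] = i
--     best = None  # element with the longest first-to-last span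
--     for x in first:
--         span = last[x] - first[x]
--         if span > 0 and (best is None or span > last[best] - first[best]):
--             best = x
--     if best is None:
--         return False, chain
--     del chain[first[best]:last[best]]
--     return True, chain
-- ===== Notes on version B (the rewrite author's own statement) =====
-- stated objective: faster
-- what changed: B replaces A's per-element full index-list scans, the list-of-pairs build and the reverse sort with a single enumerate pass recording first/last index per element followed by a linear strict-'>' argmax (which preserves A's first-occurrence tie-break), so the O(n) inner scan per distinct element and the sort disappear.
import Mathlib
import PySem

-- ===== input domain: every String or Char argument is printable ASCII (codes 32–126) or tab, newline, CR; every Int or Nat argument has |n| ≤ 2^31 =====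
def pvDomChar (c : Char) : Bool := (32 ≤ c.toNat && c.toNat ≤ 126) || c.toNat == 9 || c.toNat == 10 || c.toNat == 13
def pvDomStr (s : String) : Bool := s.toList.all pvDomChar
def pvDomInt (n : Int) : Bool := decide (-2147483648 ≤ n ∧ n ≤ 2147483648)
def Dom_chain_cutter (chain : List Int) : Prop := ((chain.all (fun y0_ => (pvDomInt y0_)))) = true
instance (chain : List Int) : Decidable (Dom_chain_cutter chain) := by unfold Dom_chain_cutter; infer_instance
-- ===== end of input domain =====

-- B replaces A's per-element index lists + sort with one pass recording first/last
-- index per element and a linear strict-'>' argmax (objective: faster, O(n^2)→O(n·k)).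
-- Both Pythons mutate `chain` in place identically (del of the same slice); the
-- equivalence proved here is about the returned value.

-- ===== PORT A =====
def chain_cutter (chain : List Int) : Bool × List Int :=
  -- elements = {}; for (ix, elx) in enumerate(chain): if elx not in elements: elements[elx] = 0; elements[elx] += 1
  let elements : PySem.Dict Int Int :=
    (PySem.List.enumerate chain).foldl
      (fun d p =>
        let d' := if d.contains p.2 then d else d.insert p.2 0
        d'.modify p.2 0 (· + 1))
      PySem.Dict.empty
  -- rep = []; for e in elements: if elements[e] > 1: rep.append([e, [ix for matching ix]])
  let rep : List (Int × List Int) :=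
    elements.keys.foldl
      (fun acc e =>
        if 1 < elements.getD e 0 then
          acc ++ [(e, (PySem.List.enumerate chain).foldl
                        (fun ixs p => if p.2 == e then ixs ++ [p.1] else ixs) [])]
        else acc)
      []
  if 0 < rep.length then
    -- dif = [[r[0], r[1][-1] - r[1][0]] for r in rep]  (each r[1] is nonempty, so the
    -- pyGetD default 0 below is never read; Python's r[1][-1]/r[1][0] cannot raise here)
    let dif : List (Int × Int) :=
      rep.foldl (fun acc r =>
        acc ++ [(r.1, PySem.List.pyGetD r.2 (-1) 0 - PySem.List.pyGetD r.2 0 0)]) []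
    -- dif.sort(reverse=True, key=lambda x: x[1]); dif[0]  (dif ≠ [] since rep ≠ [])
    let d0 := (PySem.List.sorted dif (fun x => x.2) true).headD (0, 0)
    -- max_dif_index = len(chain)+1; for l in rep: if l[0] == dif[0][0]: max_dif_index = l
    -- (the int sentinel is represented by `none`; a match always exists since dif[0][0]
    -- is a key of rep, so the `getD (0, [])` default is never read)
    let m : Option (Int × List Int) :=
      rep.foldl (fun m l => if l.1 == d0.1 then some l else m) none
    let mi := m.getD (0, [])
    -- del chain[mi[1][0] : mi[1][-1]]
    (true, PySem.List.slice chain none (some (PySem.List.pyGetD mi.2 0 0)) ++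
           PySem.List.slice chain (some (PySem.List.pyGetD mi.2 (-1) 0)) none)
  else (false, chain)

-- ===== PORT B =====
def chain_cutter_alt (chain : List Int) : Bool × List Int :=
  -- first = {}; last = {}; for i, x in enumerate(chain): if x not in first: first[x] = i; last[x] = i
  let fl :=
    (PySem.List.enumerate chain).foldl
      (fun (fd : PySem.Dict Int Int × PySem.Dict Int Int) p =>
        ((if fd.1.contains p.2 then fd.1 else fd.1.insert p.2 p.1), fd.2.insert p.2 p.1))
      (PySem.Dict.empty, PySem.Dict.empty)
  let first := fl.1
  let last := fl.2
  -- best = None; for x in first: span = last[x]-first[x];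
  --   if span > 0 and (best is None or span > last[best]-first[best]): best = x
  let best : Option Int :=
    first.keys.foldl
      (fun best x =>
        let span := last.getD x 0 - first.getD x 0
        match best with
        | none => if 0 < span then some x else best
        | some b => if 0 < span ∧ last.getD b 0 - first.getD b 0 < span then some x else best)
      none
  match best with
  | none => (false, chain)
  | some x =>
      -- del chain[first[best] : last[best]]
      (true, PySem.List.slice chain none (some (first.getD x 0)) ++
             PySem.List.slice chain (some (last.getD x 0)) none)

-- ===== PRECONDITION & SPEC =====
def Spec_chain_cutter (chain : List Int) (out : Bool × List Int) : Prop := out = chain_cutter_alt chain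
instance (chain : List Int) (out : Bool × List Int) : Decidable (Spec_chain_cutter chain out) := by unfold Spec_chain_cutter; infer_instance

-- ===== CLAIM (what is proved, stated in full; the proofs are below) =====
def Claim_equal_chain_cutter : Prop := ∀ (chain : List Int), Dom_chain_cutter chain → Spec_chain_cutter chain (chain_cutter chain)

-- ===== LEMMAS AND PROOFS =====

def pvPos (chain : List Int) (s : Int) (e : Int) : List Int :=
  ((PySem.List.enumerate chain s).filter (fun p => p.2 == e)).map (·.1)

lemma pvPos_nil (s e : Int) : pvPos [] s e = [] := rfl

lemma pvPos_cons (x : Int) (t : List Int) (s e : Int) :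
    pvPos (x :: t) s e = if x == e then s :: pvPos t (s+1) e else pvPos t (s+1) e := by
  simp only [pvPos, PySem.List.enumerate_cons, List.filter_cons]
  by_cases h : x = e <;> simp [h]

lemma pvPos_length (chain : List Int) (s e : Int) :
    (pvPos chain s e).length = chain.count e := by
  induction chain generalizing s with
  | nil => rfl
  | cons x t ih =>
    rw [pvPos_cons]
    by_cases h : x = e <;> simp [h, ih]

lemma pvPos_pairwise (chain : List Int) (s e : Int) :
    (pvPos chain s e).Pairwise (· < ·) := by
  unfold pvPos
  refine List.Pairwise.map _ (fun a b h => h) ?_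
  exact ((PySem.List.pairwise_lt_enumerate chain s).sublist List.filter_sublist)

-- B's loop: closed forms for the two dicts
lemma altLoop (chain : List Int) (s : Int) (fd : PySem.Dict Int Int × PySem.Dict Int Int) :
    (∀ e, ((PySem.List.enumerate chain s).foldl
      (fun fd p => ((if fd.1.contains p.2 then fd.1 else fd.1.insert p.2 p.1), fd.2.insert p.2 p.1)) fd).1.get? e
        = (if fd.1.contains e then fd.1.get? e else (pvPos chain s e).head?))
    ∧ (∀ e, ((PySem.List.enumerate chain s).foldl
      (fun fd p => ((if fd.1.contains p.2 then fd.1 else fd.1.insert p.2 p.1), fd.2.insert p.2 p.1)) fd).2.get? e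
        = ((pvPos chain s e).getLast?).or (fd.2.get? e))
    ∧ ((PySem.List.enumerate chain s).foldl
      (fun fd p => ((if fd.1.contains p.2 then fd.1 else fd.1.insert p.2 p.1), fd.2.insert p.2 p.1)) fd).1.keys
        = PySem.Set.update fd.1.keys chain := by
  induction chain generalizing s fd with
  | nil =>
    refine ⟨fun e => ?_, fun e => ?_, by simp [PySem.Set.update_nil]⟩
    · by_cases hc : fd.1.contains e
      · simp [hc]
      · simp [hc, pvPos_nil, (PySem.Dict.get?_eq_none_iff_contains fd.1 e).mpr (by simpa using hc)]
    · simp [pvPos_nil]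
  | cons x t ih =>
    rw [PySem.List.enumerate_cons]
    simp only [List.foldl_cons]
    set fd' : PySem.Dict Int Int × PySem.Dict Int Int :=
      ((if fd.1.contains x then fd.1 else fd.1.insert x s), fd.2.insert x s) with hfd'
    obtain ⟨ih1, ih2, ih3⟩ := ih (s+1) fd'
    refine ⟨fun e => ?_, fun e => ?_, ?_⟩
    · rw [ih1, pvPos_cons]
      by_cases hxe : x = e
      · subst hxe
        by_cases hc : fd.1.contains x
        · simp [hfd', hc]
        · have hc' : fd'.1.contains x = true := by
            simp [hfd', hc, PySem.Dict.contains_insert_self]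
          simp [hc, hfd', PySem.Dict.get?_insert_self]
      · have hce : fd'.1.contains e = fd.1.contains e := by
          by_cases hc : fd.1.contains x <;>
            simp [hfd', hc, PySem.Dict.contains_insert, beq_iff_eq, Ne.symm hxe]
        rw [hce]
        by_cases hc2 : fd.1.contains e
        · have : fd'.1.get? e = fd.1.get? e := by
            by_cases hc : fd.1.contains x <;>
              simp [hfd', hc, PySem.Dict.get?_insert_of_ne _ _ (Ne.symm hxe)]
          simp [hc2, this]
        · simp [hc2, beq_iff_eq, hxe]
    · rw [ih2, pvPos_cons]
      by_cases hxe : x = e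
      · subst hxe
        have : fd'.2.get? x = some s := by simp [hfd', PySem.Dict.get?_insert_self]
        simp only [beq_self_eq_true, if_true, this]
        cases h : (pvPos t (s+1) x).getLast? <;>
          simp [List.getLast?_cons, h, Option.or]
      · have : fd'.2.get? e = fd.2.get? e := by
          simp [hfd', PySem.Dict.get?_insert_of_ne _ _ (Ne.symm hxe)]
        simp only [beq_iff_eq, hxe, if_false, this]
    · rw [ih3]
      have : fd'.1.keys = PySem.Set.add fd.1.keys x := by
        by_cases hc : fd.1.contains x
        · have : x ∈ fd.1.keys := (PySem.Dict.contains_iff_mem_keys _ _).mp hc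
          simp [hfd', hc, PySem.Set.add_of_mem this]
        · have hm : x ∉ fd.1.keys := fun hm => by
            simp [(PySem.Dict.contains_iff_mem_keys _ _).mpr hm] at hc
          simp [hfd', hc, PySem.Dict.keys_insert_of_not_contains _ _ (by simpa using hc),
                PySem.Set.add_of_not_mem hm]
      rw [this, ← PySem.Set.update_cons]

-- head of an insertBy step (reverse order: larger keys move to the front)
lemma head?_insertBy {α : Type} (key : α → Int) (x : α) (acc : List α) :
    (PySem.List.insertBy (fun a b => decide (key b < key a)) x acc).head? =
    (match acc.head? with
     | none => some x
     | some h => if key h < key x then some x else some h) := by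
  cases acc with
  | nil => simp [PySem.List.insertBy]
  | cons h t =>
    simp only [PySem.List.insertBy, List.head?_cons]
    split_ifs with hlt <;> simp_all

-- head of Python's stable reverse sort = the first element with maximal key
lemma head?_sorted_rev {α : Type} (key : α → Int) (xs : List α) :
    (PySem.List.sorted xs key true).head? =
    xs.foldl (fun b x =>
      match b with
      | none => some x
      | some h => if key h < key x then some x else some h) none := by
  rw [PySem.List.sorted_rev_eq_foldl_insertBy]
  suffices H : ∀ (acc : List α),
      (xs.foldl (fun acc x => PySem.List.insertBy (fun a b => decide (key b < key a)) x acc) acc).head? =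
      xs.foldl (fun b x =>
        match b with
        | none => some x
        | some h => if key h < key x then some x else some h) acc.head? by
    simpa using H []
  induction xs with
  | nil => intro acc; simp
  | cons y ys ih =>
    intro acc
    simp only [List.foldl_cons]
    rw [ih]
    congr 1
    rw [head?_insertBy]

-- B's conditional fold with two agreeing span functions
lemma fold_pick_congr (f g : Int → Int) (l : List Int) (b : Option Int)
    (hb : ∀ h, b = some h → f h = g h) (hl : ∀ x ∈ l, f x = g x) :
    l.foldl (fun b x =>
      match b with
      | none => if 0 < f x then some x else b
      | some h => if 0 < f x ∧ f h < f x then some x else b) b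
    = l.foldl (fun b x =>
      match b with
      | none => if 0 < g x then some x else b
      | some h => if 0 < g x ∧ g h < g x then some x else b) b := by
  induction l generalizing b with
  | nil => rfl
  | cons x t ih =>
    simp only [List.foldl_cons]
    have hx := hl x (by simp)
    have hl' : ∀ y ∈ t, f y = g y := fun y hy => hl y (by simp [hy])
    cases b with
    | none =>
      show t.foldl _ (if 0 < f x then some x else none)
         = t.foldl _ (if 0 < g x then some x else none)
      rw [hx]
      by_cases h0 : 0 < g x
      · simp only [h0, if_true]
        exact ih _ (fun h hh => by cases hh; exact hx) hl'
      · simp only [h0, if_false]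
        exact ih _ (fun h hh => by cases hh) hl'
    | some h =>
      show t.foldl _ (if 0 < f x ∧ f h < f x then some x else some h)
         = t.foldl _ (if 0 < g x ∧ g h < g x then some x else some h)
      rw [hx, hb h rfl]
      by_cases hc : 0 < g x ∧ g h < g x
      · simp only [hc]
        exact ih _ (fun h' hh => by cases hh; exact hx) hl'
      · simp only [hc, if_false]
        exact ih _ (fun h' hh => by cases hh; exact hb h rfl) hl'

-- folding B's guarded pick over l = folding the plain pick over the filtered list
lemma fold_pick_filter (g : Int → Int) (l : List Int) (b : Option Int) :
    l.foldl (fun b x =>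
      match b with
      | none => if 0 < g x then some x else b
      | some h => if 0 < g x ∧ g h < g x then some x else b) b
    = (l.filter (fun x => decide (0 < g x))).foldl (fun b x =>
        match b with
        | none => some x
        | some h => if g h < g x then some x else some h) b := by
  induction l generalizing b with
  | nil => rfl
  | cons x t ih =>
    simp only [List.foldl_cons, List.filter_cons]
    by_cases h0 : 0 < g x
    · cases b with
      | none =>
        show t.foldl _ (if 0 < g x then some x else none) = _
        simp only [h0, if_true, decide_true, List.foldl_cons]
        exact ih _
      | some h =>
        show t.foldl _ (if 0 < g x ∧ g h < g x then some x else some h) = _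
        by_cases hlt : g h < g x
        · simp only [h0, hlt, and_self, if_true, decide_true, List.foldl_cons]
          exact ih _
        · simp only [h0, hlt, and_false, if_false, decide_true]
          simpa [hlt] using ih (some h)
    · cases b with
      | none =>
        show t.foldl _ (if 0 < g x then some x else none) = _
        simp only [h0, if_false, decide_false]
        exact ih _
      | some h =>
        show t.foldl _ (if 0 < g x ∧ g h < g x then some x else some h) = _
        simp only [h0, false_and, if_false, decide_false]
        exact ih _

lemma pick_some_ne_none (g : Int → Int) (t : List Int) (b : Int) :
    t.foldl (fun b x =>
      match b with
      | none => some x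
      | some h => if g h < g x then some x else some h) (some b) ≠ none := by
  induction t generalizing b with
  | nil => simp
  | cons y ys ih =>
    simp only [List.foldl_cons]
    show ys.foldl _ (if g b < g y then some y else some b) ≠ none
    by_cases hlt : g b < g y
    · simpa [hlt] using ih y
    · simpa [hlt] using ih b

lemma pick_eq_none_iff (g : Int → Int) (l : List Int) :
    l.foldl (fun b x =>
      match b with
      | none => some x
      | some h => if g h < g x then some x else some h) none = none ↔ l = [] := by
  cases l with
  | nil => simp
  | cons x t =>
    simp only [List.foldl_cons]
    constructor
    · intro h
      exact absurd h (pick_some_ne_none g t x)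
    · intro h; cases h

lemma pick_mem (g : Int → Int) (l : List Int) (e : Int)
    (h : l.foldl (fun b x =>
      match b with
      | none => some x
      | some h => if g h < g x then some x else some h) none = some e) : e ∈ l := by
  suffices H : ∀ (b : Option Int), l.foldl (fun b x =>
      match b with
      | none => some x
      | some h => if g h < g x then some x else some h) b = some e → e ∈ l ∨ b = some e by
    rcases H none h with h' | h'
    · exact h'
    · cases h'
  clear h
  induction l with
  | nil => intro b hb; exact Or.inr hb
  | cons x t ih =>
    intro b hb
    simp only [List.foldl_cons] at hb
    cases b with
    | none =>
      rcases ih (some x) hb with h' | h'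
      · exact Or.inl (by simp [h'])
      · rw [Option.some_inj] at h'; exact Or.inl (by simp [h'])
    | some hh =>
      rw [show (match (some hh : Option Int) with
            | none => some x
            | some h => if g h < g x then some x else some h)
          = if g hh < g x then some x else some hh from rfl] at hb
      by_cases hlt : g hh < g x
      · rw [if_pos hlt] at hb
        rcases ih (some x) hb with h' | h'
        · exact Or.inl (by simp [h'])
        · rw [Option.some_inj] at h'; exact Or.inl (by simp [h'])
      · rw [if_neg hlt] at hb
        rcases ih (some hh) hb with h' | h'
        · exact Or.inl (by simp [h'])
        · exact Or.inr h'

-- the last-match loop over a list with distinct firsts picks the unique match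
lemma last_match_skip (f : Int → Int × List Int) (hf : ∀ e, (f e).1 = e)
    (e0 : Int) (R : List Int) (b : Option (Int × List Int)) (hmem : e0 ∉ R) :
    (R.map f).foldl (fun m l => if l.1 == e0 then some l else m) b = b := by
  induction R generalizing b with
  | nil => rfl
  | cons x t ih =>
    have hxe : ¬ x = e0 := fun h => hmem (by simp [h])
    have hmem' : e0 ∉ t := fun h => hmem (by simp [h])
    simp only [List.map_cons, List.foldl_cons, hf x]
    rw [show (if (x == e0) = true then some (f x) else b) = b by simp [beq_iff_eq, hxe]]
    exact ih b hmem'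
  
lemma last_match (f : Int → Int × List Int) (hf : ∀ e, (f e).1 = e)
    (R : List Int) (hnd : R.Nodup) (e0 : Int) (he : e0 ∈ R) (b : Option (Int × List Int)) :
    (R.map f).foldl (fun m l => if l.1 == e0 then some l else m) b = some (f e0) := by
  induction R generalizing b with
  | nil => cases he
  | cons x t ih =>
    simp only [List.map_cons, List.foldl_cons, hf x]
    by_cases hxe : x = e0
    · subst hxe
      have hx : x ∉ t := (List.nodup_cons.mp hnd).1
      rw [show (if (x == x) = true then some (f x) else b) = some (f x) by simp]
      exact last_match_skip f hf x t (some (f x)) hx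
    · have hmem' : e0 ∈ t := by
        rcases List.mem_cons.mp he with h | h
        · exact absurd h.symm hxe
        · exact h
      rw [show (if (x == e0) = true then some (f x) else b) = b by simp [beq_iff_eq, hxe]]
      exact ih (List.nodup_cons.mp hnd).2 hmem' b

-- A's ensure-then-increment step is one Counter step
lemma count_step (d : PySem.Dict Int Int) (x : Int) :
    (if d.contains x then d else d.insert x 0).modify x 0 (· + 1) = d.modify x 0 (· + 1) := by
  by_cases hc : d.contains x
  · simp [hc]
  · simp only [hc, Bool.false_eq_true, if_false, PySem.Dict.modify,
      PySem.Dict.getD_insert_self, PySem.Dict.insert_insert_self]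
    rw [PySem.Dict.getD_of_not_contains _ _ (by simpa using hc)]

lemma countLoop_eq_counter (chain : List Int) :
    (PySem.List.enumerate chain).foldl
      (fun d p =>
        (if d.contains p.2 then d else d.insert p.2 0).modify p.2 0 (· + 1))
      PySem.Dict.empty = PySem.Dict.counter chain := by
  have h1 : (PySem.List.enumerate chain).foldl
      (fun d p =>
        (if d.contains p.2 then d else d.insert p.2 0).modify p.2 0 (· + 1))
      PySem.Dict.empty
      = (PySem.List.enumerate chain).foldl (fun d p => d.modify p.2 0 (· + 1)) (PySem.Dict.empty : PySem.Dict Int Int) := by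
    congr 1
    funext d p
    exact count_step d p.2
  rw [h1]
  conv_rhs => rw [PySem.Dict.counter_eq_foldl, ← PySem.List.map_snd_enumerate chain 0, List.foldl_map]

def pvSpan (chain : List Int) (e : Int) : Int :=
  PySem.List.pyGetD (pvPos chain 0 e) (-1) 0 - PySem.List.pyGetD (pvPos chain 0 e) 0 0

lemma pvPos_ne_nil (chain : List Int) (e : Int) (he : e ∈ chain) : pvPos chain 0 e ≠ [] := by
  have hlen := pvPos_length chain 0 e
  have hc : 0 < chain.count e := List.count_pos_iff.mpr he
  intro h
  rw [h] at hlen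
  simp at hlen
  omega

lemma span_pos_iff (chain : List Int) (e : Int) (he : e ∈ chain) :
    1 < ((chain.count e : Nat) : Int) ↔ 0 < pvSpan chain e := by
  have hlen := pvPos_length chain 0 e
  have hpw := pvPos_pairwise chain 0 e
  have hc : 0 < chain.count e := List.count_pos_iff.mpr he
  unfold pvSpan
  cases hl : pvPos chain 0 e with
  | nil => rw [hl] at hlen; simp at hlen; omega
  | cons a rest =>
    rw [hl] at hlen hpw
    cases rest with
    | nil =>
      simp only [List.length_cons, List.length_nil] at hlen
      rw [PySem.List.pyGetD_neg_one _ _ (by simp), PySem.List.pyGetD_zero]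
      simp
      omega
    | cons b rest2 =>
      have hne : (a :: b :: rest2 : List Int) ≠ [] := by simp
      rw [PySem.List.pyGetD_neg_one _ _ hne, PySem.List.pyGetD_zero]
      have hmem : (a :: b :: rest2).getLast hne ∈ b :: rest2 := by
        rw [List.getLast_cons (by simp)]
        exact List.getLast_mem _
      have hlt : a < (a :: b :: rest2).getLast hne :=
        (List.pairwise_cons.mp hpw).1 _ hmem
      simp only [List.length_cons] at hlen
      simp only [List.getD_cons_zero]
      omega

def altFold (chain : List Int) : PySem.Dict Int Int × PySem.Dict Int Int :=
  (PySem.List.enumerate chain).foldl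
    (fun fd p => ((if fd.1.contains p.2 then fd.1 else fd.1.insert p.2 p.1), fd.2.insert p.2 p.1))
    ((PySem.Dict.empty : PySem.Dict Int Int), (PySem.Dict.empty : PySem.Dict Int Int))

lemma altFold_first_get? (chain : List Int) (e : Int) :
    (altFold chain).1.get? e = (pvPos chain 0 e).head? := by
  have h := (altLoop chain 0 (PySem.Dict.empty, PySem.Dict.empty)).1 e
  simpa [altFold, PySem.Dict.contains_empty] using h

lemma altFold_last_get? (chain : List Int) (e : Int) :
    (altFold chain).2.get? e = (pvPos chain 0 e).getLast? := by
  have h := (altLoop chain 0 (PySem.Dict.empty, PySem.Dict.empty)).2.1 e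
  simpa [altFold, PySem.Dict.get?_empty] using h

lemma altFold_keys (chain : List Int) :
    (altFold chain).1.keys = PySem.Set.ofList chain := by
  have h := (altLoop chain 0 (PySem.Dict.empty, PySem.Dict.empty)).2.2
  simpa [altFold, PySem.Dict.keys_empty, PySem.Set.update_nil_left] using h

lemma altFold_first_getD (chain : List Int) (e : Int) (_he : e ∈ chain) :
    (altFold chain).1.getD e 0 = PySem.List.pyGetD (pvPos chain 0 e) 0 0 := by
  rw [PySem.Dict.getD_eq_get?_getD, altFold_first_get?, PySem.List.pyGetD_zero]
  cases hl : pvPos chain 0 e with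
  | nil => simp
  | cons a rest => simp

lemma altFold_last_getD (chain : List Int) (e : Int) (he : e ∈ chain) :
    (altFold chain).2.getD e 0 = PySem.List.pyGetD (pvPos chain 0 e) (-1) 0 := by
  have hne := pvPos_ne_nil chain e he
  rw [PySem.Dict.getD_eq_get?_getD, altFold_last_get?,
      PySem.List.pyGetD_neg_one _ _ hne, List.getLast?_eq_some_getLast (h := hne)]
  rfl

def pvR (chain : List Int) : List Int :=
  (PySem.Set.ofList chain).filter (fun e => decide (0 < pvSpan chain e))

def pvPick (chain : List Int) : Option Int :=
  (pvR chain).foldl (fun b x =>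
    match b with
    | none => some x
    | some h => if pvSpan chain h < pvSpan chain x then some x else some h) none

def pvCanon (chain : List Int) : Bool × List Int :=
  match pvPick chain with
  | none => (false, chain)
  | some e0 =>
      (true, PySem.List.slice chain none (some (PySem.List.pyGetD (pvPos chain 0 e0) 0 0)) ++
             PySem.List.slice chain (some (PySem.List.pyGetD (pvPos chain 0 e0) (-1) 0)) none)

-- Prop-conditioned append-if loop, bridged to PySem.List.foldl_append_if
lemma foldl_append_if_prop {α β : Type} (p : α → Prop) [DecidablePred p] (f : α → β) (l : List α) :
    l.foldl (fun acc x => if p x then acc ++ [f x] else acc) [] = (l.filter (fun x => decide (p x))).map f := by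
  have h := PySem.List.foldl_append_if (fun x => decide (p x)) f l []
  simpa using h

lemma rep_eq (chain : List Int) :
    (PySem.Dict.counter chain).keys.foldl
      (fun acc e =>
        if 1 < (PySem.Dict.counter chain).getD e 0 then
          acc ++ [(e, (PySem.List.enumerate chain).foldl
                        (fun ixs p => if p.2 == e then ixs ++ [p.1] else ixs) [])]
        else acc) []
    = (pvR chain).map (fun e => (e, pvPos chain 0 e)) := by
  have hinner : ∀ e, (PySem.List.enumerate chain).foldl
      (fun ixs p => if p.2 == e then ixs ++ [p.1] else ixs) [] = pvPos chain 0 e := by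
    intro e
    have h := PySem.List.foldl_append_if (fun p : Int × Int => p.2 == e) (fun p => p.1)
      (PySem.List.enumerate chain) []
    simpa [pvPos] using h
  have h1 : (PySem.Dict.counter chain).keys.foldl
      (fun acc e =>
        if 1 < (PySem.Dict.counter chain).getD e 0 then
          acc ++ [(e, (PySem.List.enumerate chain).foldl
                        (fun ixs p => if p.2 == e then ixs ++ [p.1] else ixs) [])]
        else acc) []
      = (PySem.Dict.counter chain).keys.foldl
        (fun acc e =>
          if 1 < (PySem.Dict.counter chain).getD e 0 then
            acc ++ [(e, pvPos chain 0 e)]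
          else acc) [] := by
    congr 1
    funext acc e
    rw [hinner]
  rw [h1, foldl_append_if_prop (fun e => 1 < (PySem.Dict.counter chain).getD e 0)
        (fun e => (e, pvPos chain 0 e)) (PySem.Dict.counter chain).keys,
      PySem.Dict.keys_counter]
  congr 1
  unfold pvR
  refine List.filter_congr ?_
  intro e he
  rw [PySem.Dict.getD_counter]
  exact decide_eq_decide.mpr (span_pos_iff chain e ((PySem.Set.mem_ofList _ _).mp he))

lemma dif_head (chain : List Int) :
    ((PySem.List.sorted ((pvR chain).map (fun e => (e, pvSpan chain e))) (fun x => x.2) true).headD (0, 0))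
    = ((pvPick chain).map (fun e => (e, pvSpan chain e))).getD (0, 0) := by
  rw [List.headD_eq_head?_getD]
  congr 1
  rw [head?_sorted_rev (fun x : Int × Int => x.2) ((pvR chain).map (fun e => (e, pvSpan chain e))),
      List.foldl_map]
  suffices H : ∀ (b : Option Int),
      List.foldl
        (fun x y =>
          match x with
          | none => some (y, pvSpan chain y)
          | some h => if h.2 < (y, pvSpan chain y).2 then some (y, pvSpan chain y) else some h)
        (Option.map (fun e => (e, pvSpan chain e)) b) (pvR chain) =
      Option.map (fun e => (e, pvSpan chain e))
        (List.foldl (fun b x =>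
          match b with
          | none => some x
          | some h => if pvSpan chain h < pvSpan chain x then some x else some h) b (pvR chain)) by
    have h := H none
    rw [Option.map_none] at h
    rw [pvPick]
    refine Eq.trans ?_ h
    congr 1
    funext x y
    cases x <;> rfl
  generalize pvR chain = R
  intro b
  induction R generalizing b with
  | nil => rfl
  | cons x t ih =>
    simp only [List.foldl_cons]
    cases b with
    | none => simpa using ih (some x)
    | some h =>
      by_cases hlt : pvSpan chain h < pvSpan chain x
      · simpa [hlt] using ih (some x)
      · simpa [hlt] using ih (some h)

lemma pvPick_eq_canonstep (chain : List Int) : pvPick chain =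
    (pvR chain).foldl (fun b x =>
      match b with
      | none => some x
      | some h => if pvSpan chain h < pvSpan chain x then some x else some h) none := by
  rfl

lemma chain_cutter_alt_eq (chain : List Int) : chain_cutter_alt chain = pvCanon chain := by
  simp only [chain_cutter_alt]
  rw [show (PySem.List.enumerate chain).foldl
      (fun fd p => ((if fd.1.contains p.2 then fd.1 else fd.1.insert p.2 p.1), fd.2.insert p.2 p.1))
      ((PySem.Dict.empty : PySem.Dict Int Int), (PySem.Dict.empty : PySem.Dict Int Int)) = altFold chain from rfl]
  rw [altFold_keys]
  have hl : ∀ x ∈ PySem.Set.ofList chain,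
      (fun x => (altFold chain).2.getD x 0 - (altFold chain).1.getD x 0) x = pvSpan chain x := by
    intro x hx
    have hxc : x ∈ chain := (PySem.Set.mem_ofList _ _).mp hx
    simp only
    rw [altFold_first_getD _ _ hxc, altFold_last_getD _ _ hxc]
    rfl
  have hbest : (PySem.Set.ofList chain).foldl
      (fun best x =>
        match best with
        | none =>
          if 0 < (altFold chain).2.getD x 0 - (altFold chain).1.getD x 0 then some x else best
        | some b =>
          if 0 < (altFold chain).2.getD x 0 - (altFold chain).1.getD x 0 ∧
              (altFold chain).2.getD b 0 - (altFold chain).1.getD b 0 <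
                (altFold chain).2.getD x 0 - (altFold chain).1.getD x 0 then some x else best)
      none = pvPick chain := by
    have h1 := fold_pick_congr (fun x => (altFold chain).2.getD x 0 - (altFold chain).1.getD x 0)
      (pvSpan chain) (PySem.Set.ofList chain) none (fun h hh => by cases hh) hl
    have h2 := fold_pick_filter (pvSpan chain) (PySem.Set.ofList chain) none
    refine Eq.trans ?_ ((h1.trans h2).trans ?_)
    · congr 1
    · rw [pvPick_eq_canonstep]
      rfl
  rw [hbest]
  cases hp : pvPick chain with
  | none => simp [pvCanon, hp]
  | some e0 =>
    have hp' := hp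
    rw [pvPick_eq_canonstep] at hp'
    have hmem : e0 ∈ pvR chain := pick_mem (pvSpan chain) (pvR chain) e0 hp'
    have he0 : e0 ∈ chain := (PySem.Set.mem_ofList _ _).mp (List.mem_filter.mp hmem).1
    simp only [pvCanon, hp]
    rw [altFold_first_getD _ _ he0, altFold_last_getD _ _ he0]

lemma chain_cutter_eq (chain : List Int) : chain_cutter chain = pvCanon chain := by
  simp only [chain_cutter]
  rw [countLoop_eq_counter, rep_eq]
  cases hp : pvPick chain with
  | none =>
    have hR : pvR chain = [] := by
      rw [pvPick_eq_canonstep] at hp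
      exact (pick_eq_none_iff _ _).mp hp
    simp [hR, pvCanon, hp]
  | some e0 =>
    have hp' := hp
    rw [pvPick_eq_canonstep] at hp'
    have hmem : e0 ∈ pvR chain := pick_mem _ _ _ hp'
    have hR : pvR chain ≠ [] := by
      intro h; rw [h] at hmem; cases hmem
    rw [if_pos]
    swap
    · simpa [List.length_pos_iff] using hR
    rw [show (List.foldl (fun acc r =>
          acc ++ [(r.1, PySem.List.pyGetD r.2 (-1) 0 - PySem.List.pyGetD r.2 0 0)]) []
          ((pvR chain).map (fun e => (e, pvPos chain 0 e))))
        = ((pvR chain).map (fun e => (e, pvSpan chain e))) from by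
      rw [PySem.List.foldl_append_singleton_eq_map, List.nil_append, List.map_map]
      rfl]
    rw [dif_head, hp]
    rw [show ((Option.map (fun e => (e, pvSpan chain e)) (some e0)).getD (0, 0)).1 = e0 from rfl]
    have hnd : (pvR chain).Nodup := (PySem.Set.nodup_ofList chain).filter _
    have hlm : List.foldl (fun m l => if (l.1 == e0) = true then some l else m) none
        (List.map (fun e => (e, pvPos chain 0 e)) (pvR chain)) = some (e0, pvPos chain 0 e0) :=
      last_match (fun e => (e, pvPos chain 0 e)) (fun e => rfl) (pvR chain) hnd e0 hmem none
    rw [hlm]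
    simp [pvCanon, hp]

-- ===== VERDICT (by name: the statement is the Claim_ definition above) =====
theorem chain_cutter_spec : Claim_equal_chain_cutter := by
  intro chain _
  unfold Spec_chain_cutter
  rw [chain_cutter_eq, chain_cutter_alt_eq]
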